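-- pv_equiv track=rewrite | github.com/bean-frog/fooph-projects | Python/examples/schedule.py | find_building
-- ===== SOURCE A (Python) =====
-- locations = {
--     100: "vapa",
--     200: "english",
--     300: "language",
--     500: "cs",
--     700: "testing center",
--     800: "history",
--     1700: "science"
-- }
--
-- special_cases = {
--     500: "library",
--     800: "math",
--     800: "social studies",
--     100: "band",
--     100: "choir"
-- }
--
-- def find_building(dest):
--     for building, subject in special_cases.items():
--         if subject == dest:
--             return building
--     for building, subject in locations.items():
--         if subject == dest:
--             return building
--     return None
-- ===== SOURCE B (Python) =====
-- locations = {
--     100: "vapa",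
--     200: "english",
--     300: "language",
--     500: "cs",
--     700: "testing center",
--     800: "history",
--     1700: "science"
-- }
--
-- special_cases = {
--     500: "library",
--     800: "math",
--     800: "social studies",
--     100: "band",
--     100: "choir"
-- }
--
-- # Inverted index built once: subject name -> building number.
-- _SUBJECT_TO_BUILDING = {subject: building
--                         for building, subject in (*locations.items(), *special_cases.items())}
--
-- def find_building(dest):
--     try:
--         return _SUBJECT_TO_BUILDING.get(dest)
--     except TypeError:  # unhashable dest: the original == scan just finds nothing
--         return None
-- ===== Notes on version B (the rewrite author's own statement) =====
-- stated objective: idiomatic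
-- what changed: Replaces the two linear == scans over the dicts' values with a single precomputed inverted dict (subject -> building) and one hash lookup; the scans disappear.
import Mathlib
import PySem

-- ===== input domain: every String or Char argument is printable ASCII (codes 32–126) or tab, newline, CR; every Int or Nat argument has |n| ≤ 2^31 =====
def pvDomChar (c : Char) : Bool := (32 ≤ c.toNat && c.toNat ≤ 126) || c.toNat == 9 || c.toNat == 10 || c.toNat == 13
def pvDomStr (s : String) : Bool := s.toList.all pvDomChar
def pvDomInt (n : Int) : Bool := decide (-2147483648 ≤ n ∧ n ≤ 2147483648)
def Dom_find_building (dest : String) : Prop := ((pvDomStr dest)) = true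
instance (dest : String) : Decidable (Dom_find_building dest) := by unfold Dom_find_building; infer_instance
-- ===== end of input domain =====

-- B replaces A's two linear value-scans with one precomputed inverted dict (subject -> building) and a single lookup (idiomatic).


-- ===== PORT A =====
-- the module dicts (special_cases collapses its duplicate keys 800 and 100, insertion order)
def locationsA : PySem.Dict Int String :=
  PySem.Dict.ofList [(100, "vapa"), (200, "english"), (300, "language"), (500, "cs"),
                     (700, "testing center"), (800, "history"), (1700, "science")]
def special_casesA : PySem.Dict Int String :=
  PySem.Dict.ofList [(500, "library"), (800, "math"), (800, "social studies"),
                     (100, "band"), (100, "choir")]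

-- 'for building, subject in d.items(): if subject == dest: return building'
def scanLoop (items : List (Int × String)) (dest : String) : Option Int :=
  match items with
  | [] => none
  | (building, subject) :: rest =>
      if subject = dest then some building else scanLoop rest dest

def find_building (dest : String) : Option Int :=
  match scanLoop special_casesA.items dest with
  | some b => some b
  | none =>
      match scanLoop locationsA.items dest with
      | some b => some b
      | none => none

-- ===== PORT B =====
-- inverted index built once from locations' then special_cases' pairs
def subjectToBuilding : PySem.Dict String Int :=
  PySem.Dict.ofList ((locationsA.items ++ special_casesA.items).map (fun p => (p.2, p.1)))

def find_building_alt (dest : String) : Option Int :=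
  subjectToBuilding.get? dest

-- ===== PRECONDITION & SPEC =====
def Spec_find_building (dest : String) (out : Option Int) : Prop := out = find_building_alt dest
instance (dest : String) (out : Option Int) : Decidable (Spec_find_building dest out) := by unfold Spec_find_building; infer_instance

-- ===== CLAIM (what is proved, stated in full; the proofs are below) =====
def Claim_equal_find_building : Prop := ∀ (dest : String), Dom_find_building dest → Spec_find_building dest (find_building dest)

-- ===== LEMMAS AND PROOFS =====

-- ===== VERDICT (by name: the statement is the Claim_ definition above) =====
set_option maxHeartbeats 2000000 in
theorem find_building_spec : Claim_equal_find_building := by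
  intro dest _
  unfold Spec_find_building find_building find_building_alt
  have h1 : special_casesA.items =
      [(500, "library"), (800, "social studies"), (100, "choir")] := by decide
  have h2 : locationsA.items =
      [(100, "vapa"), (200, "english"), (300, "language"), (500, "cs"),
       (700, "testing center"), (800, "history"), (1700, "science")] := by decide
  have h3 : subjectToBuilding = PySem.Dict.mk
      [("vapa", 100), ("english", 200), ("language", 300), ("cs", 500),
       ("testing center", 700), ("history", 800), ("science", 1700),
       ("library", 500), ("social studies", 800), ("choir", 100)] := by decide
  rw [h1, h2, h3]
  simp only [scanLoop, PySem.Dict.get?_mk_cons, beq_iff_eq]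
  split_ifs <;> (try subst_vars) <;> simp_all [PySem.Dict.get?]
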